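-- pv_equiv track=rewrite | github.com/opieters/gloxinia2 | pygloxinia/filter_design/filter_design.py | filter_zeros
-- ===== SOURCE A (Python) =====
-- def filter_zeros(coeffs):
--     i = 0
--     while (i < len(coeffs)) and (coeffs[i] == 0):
--         i+=1
--     coeffs = coeffs[i:]
--     i = len(coeffs)
--     while (i > 0) and (coeffs[i-1] == 0):
--         i -= 1
--     coeffs = coeffs[:i]
--
--     return coeffs
-- ===== SOURCE B (Python) =====
-- def filter_zeros(coeffs):
--     first = None
--     last = None
--     for i, c in enumerate(coeffs):
--         if c != 0:
--             if first is None: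
--                 first = i
--             last = i
--     if first is None:
--         return coeffs[:0]
--     return coeffs[first:last + 1]
-- ===== Notes on version B (the rewrite author's own statement) =====
-- stated objective: alternative
-- what changed: Replaces A's two successive trim loops (front scan, then back scan over the truncated copy) with a single enumerate pass that tracks the first and last non-zero indices and slices the input exactly once.
import Mathlib
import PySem

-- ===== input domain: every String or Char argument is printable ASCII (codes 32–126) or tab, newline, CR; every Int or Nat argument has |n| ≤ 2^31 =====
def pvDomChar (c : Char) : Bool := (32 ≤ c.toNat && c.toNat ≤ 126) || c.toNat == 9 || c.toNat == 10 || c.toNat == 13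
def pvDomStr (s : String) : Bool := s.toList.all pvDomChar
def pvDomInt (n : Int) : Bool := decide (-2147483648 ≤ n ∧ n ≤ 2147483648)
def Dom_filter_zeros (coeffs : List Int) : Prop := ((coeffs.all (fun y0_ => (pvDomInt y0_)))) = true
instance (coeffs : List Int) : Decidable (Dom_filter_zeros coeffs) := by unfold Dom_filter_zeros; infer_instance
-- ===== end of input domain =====

-- B replaces A's two successive trim loops with one enumerate pass tracking the
-- first/last non-zero indices, then slices once (objective: alternative, same cost).

-- ===== PORT A =====
-- first while loop: i advances while i < len(coeffs) and coeffs[i] == 0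
-- (the guard keeps the index in range, so List.getD equals Python's coeffs[i])
def filterZerosLead (coeffs : List Int) (i : Nat) : Nat :=
  if h : i < coeffs.length ∧ coeffs.getD i 0 = 0 then filterZerosLead coeffs (i + 1) else i
termination_by coeffs.length - i
decreasing_by omega

-- second while loop: i decreases while i > 0 and coeffs[i-1] == 0
def filterZerosTrail (coeffs : List Int) (i : Nat) : Nat :=
  if 0 < i ∧ coeffs.getD (i - 1) 0 = 0 then filterZerosTrail coeffs (i - 1) else i
termination_by i

def filter_zeros (coeffs : List Int) : List Int :=
  let i := filterZerosLead coeffs 0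
  let coeffs1 := coeffs.drop i          -- coeffs[i:] with 0 ≤ i, exact
  let j := filterZerosTrail coeffs1 coeffs1.length
  coeffs1.take j                        -- coeffs[:j] with 0 ≤ j, exact

-- ===== PORT B =====
-- the for-loop over enumerate(coeffs): state (first, last)
def fzGo : List (Int × Int) → Option Int → Option Int → Option Int × Option Int
  | [], first, last => (first, last)
  | (i, c) :: rest, first, last =>
      if c ≠ 0 then
        fzGo rest (match first with | none => some i | some f => some f) (some i)
      else fzGo rest first last

def filter_zeros_alt (coeffs : List Int) : List Int :=
  match fzGo (PySem.List.enumerate coeffs) none none with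
  | (some f, some l) => PySem.List.slice coeffs (some f) (some (l + 1))  -- coeffs[first:last+1]
  | (_, _) => PySem.List.slice coeffs none (some 0)                      -- coeffs[:0]

-- ===== PRECONDITION & SPEC =====
def Spec_filter_zeros (coeffs : List Int) (out : List Int) : Prop := out = filter_zeros_alt coeffs
instance (coeffs : List Int) (out : List Int) : Decidable (Spec_filter_zeros coeffs out) := by unfold Spec_filter_zeros; infer_instance

-- ===== CLAIM (what is proved, stated in full; the proofs are below) =====
def Claim_equal_filter_zeros : Prop := ∀ (coeffs : List Int), Dom_filter_zeros coeffs → Spec_filter_zeros coeffs (filter_zeros coeffs)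

-- ===== LEMMAS AND PROOFS =====

/-- index of the first non-zero element -/
def firstNz : List Int → Option Nat
  | [] => none
  | x :: xs => if x = 0 then (firstNz xs).map (· + 1) else some 0

/-- index of the last non-zero element -/
def lastNz : List Int → Option Nat
  | [] => none
  | x :: xs =>
      match lastNz xs with
      | some k => some (k + 1)
      | none => if x = 0 then none else some 0

theorem fzGo_spec (xs : List Int) : ∀ (s : Int) (f0 l0 : Option Int),
    fzGo (PySem.List.enumerate xs s) f0 l0 =
      ((match f0 with
        | some f => some f
        | none => (firstNz xs).map (fun k => s + (k : Int))),
       (match lastNz xs with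
        | some k => some (s + (k : Int))
        | none => l0)) := by
  induction xs with
  | nil =>
    intro s f0 l0
    cases f0 <;> simp [PySem.List.enumerate_nil, fzGo, firstNz, lastNz]
  | cons x xs ih =>
    intro s f0 l0
    rw [PySem.List.enumerate_cons]
    by_cases hx : x = 0
    · simp only [fzGo, hx, ne_eq, not_true_eq_false, if_false, ih]
      refine Prod.ext ?_ ?_ <;> simp only
      · cases f0 <;> cases hF : firstNz xs <;>
          simp [firstNz, hx, hF] <;> push_cast <;> ring
      · cases hL : lastNz xs <;>
          simp [lastNz, hx, hL] <;> push_cast <;> ring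
    · simp only [fzGo, hx, ne_eq, not_false_eq_true, if_true, ih]
      refine Prod.ext ?_ ?_ <;> simp only
      · cases f0 <;> simp [firstNz, hx]
      · cases hL : lastNz xs <;>
          simp [lastNz, hx, hL] <;> push_cast <;> ring


theorem lead_spec (coeffs : List Int) (i : Nat) : i ≤ coeffs.length →
    filterZerosLead coeffs i =
      (firstNz (coeffs.drop i)).elim coeffs.length (fun k => i + k) := by
  fun_induction filterZerosLead coeffs i with
  | case1 i h ih =>
    intro hi
    rw [ih (by omega)]
    have hz : coeffs[i] = 0 := by
      have := h.2; rwa [List.getD_eq_getElem coeffs 0 h.1] at this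
    rw [List.drop_eq_getElem_cons h.1]
    cases hF : firstNz (coeffs.drop (i + 1)) with
    | none => simp [firstNz, hz, hF]
    | some k =>
      simp [firstNz, hz, hF]
      omega
  | case2 i h =>
    intro hi
    rcases Nat.lt_or_ge i coeffs.length with hlt | hge
    · have hz : ¬ coeffs[i] = 0 := by
        intro hz0
        exact h ⟨hlt, by rw [List.getD_eq_getElem coeffs 0 hlt]; exact hz0⟩
      rw [List.drop_eq_getElem_cons hlt]
      simp [firstNz, hz]
    · have : i = coeffs.length := by omega
      subst this
      simp [List.drop_length, firstNz]

theorem lastNz_append (ys : List Int) (c : Int) :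
    lastNz (ys ++ [c]) = if c = 0 then lastNz ys else some ys.length := by
  induction ys with
  | nil => by_cases hc : c = 0 <;> simp [lastNz, hc]
  | cons y ys ih =>
    simp only [List.cons_append, lastNz, ih]
    by_cases hc : c = 0 <;> by_cases hy : y = 0 <;> cases hL : lastNz ys <;>
      simp [lastNz, hc, hy, hL]

theorem trail_spec (coeffs : List Int) (i : Nat) : i ≤ coeffs.length →
    filterZerosTrail coeffs i =
      (lastNz (coeffs.take i)).elim 0 (fun k => k + 1) := by
  fun_induction filterZerosTrail coeffs i with
  | case1 i h ih =>
    intro hi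
    rw [ih (by omega)]
    have hlt : i - 1 < coeffs.length := by omega
    have hz : coeffs[i - 1] = 0 := by
      have := h.2; rwa [List.getD_eq_getElem coeffs 0 hlt] at this
    have htake : coeffs.take i = coeffs.take (i - 1) ++ [coeffs[i - 1]] := by
      have h1 : i = (i - 1) + 1 := by omega
      conv_lhs => rw [h1]
      rw [List.take_succ, List.getElem?_eq_getElem hlt]
      simp
    rw [htake, lastNz_append, if_pos hz]
  | case2 i h =>
    intro hi
    rcases Nat.eq_zero_or_pos i with h0 | hpos
    · subst h0; simp [lastNz]
    · have hlt : i - 1 < coeffs.length := by omega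
      have hz : ¬ coeffs[i - 1] = 0 := by
        intro hz0
        exact h ⟨hpos, by rw [List.getD_eq_getElem coeffs 0 hlt]; exact hz0⟩
      have htake : coeffs.take i = coeffs.take (i - 1) ++ [coeffs[i - 1]] := by
        have h1 : i = (i - 1) + 1 := by omega
        conv_lhs => rw [h1]
        rw [List.take_succ, List.getElem?_eq_getElem hlt]
        simp
      rw [htake, lastNz_append, if_neg hz]
      have : (coeffs.take (i - 1)).length = i - 1 := by
        simp [List.length_take]; omega
      simp [this]; omega

theorem firstNz_none_iff (xs : List Int) : firstNz xs = none ↔ lastNz xs = none := by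
  induction xs with
  | nil => simp [firstNz, lastNz]
  | cons x xs ih =>
    by_cases hx : x = 0 <;>
      cases hF : firstNz xs <;> cases hL : lastNz xs <;>
      simp_all [firstNz, lastNz]

theorem lastNz_lt_length (xs : List Int) : ∀ k, lastNz xs = some k → k < xs.length := by
  induction xs with
  | nil => simp [lastNz]
  | cons x xs ih =>
    intro k hk
    cases hL : lastNz xs with
    | some m =>
      have := ih m hL
      simp [lastNz, hL] at hk
      simp [← hk]; omega
    | none =>
      by_cases hx : x = 0 <;> simp_all [lastNz] <;> omega

theorem firstNz_le_lastNz (xs : List Int) : ∀ k₁ k₂, firstNz xs = some k₁ → lastNz xs = some k₂ → k₁ ≤ k₂ := by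
  induction xs with
  | nil => simp [firstNz]
  | cons x xs ih =>
    intro k₁ k₂ h1 h2
    by_cases hx : x = 0
    · cases hF : firstNz xs with
      | none => simp [firstNz, hx, hF] at h1
      | some m₁ =>
        cases hL : lastNz xs with
        | none => exact absurd hF (by rw [(firstNz_none_iff xs).mpr hL]; simp)
        | some m₂ =>
          simp [firstNz, hx, hF] at h1
          simp [lastNz, hL] at h2
          have := ih m₁ m₂ hF hL
          omega
    · simp [firstNz, hx] at h1
      omega

theorem lastNz_drop (xs : List Int) : ∀ i k, lastNz xs = some k → i ≤ k → lastNz (xs.drop i) = some (k - i) := by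
  induction xs with
  | nil => simp [lastNz]
  | cons x xs ih =>
    intro i k hk hik
    cases i with
    | zero => simpa using hk
    | succ i =>
      cases hL : lastNz xs with
      | some m =>
        simp [lastNz, hL] at hk
        simp only [List.drop_succ_cons]
        rw [ih i m hL (by omega)]
        congr 1; omega
      | none =>
        by_cases hx : x = 0 <;> simp_all [lastNz] <;> omega

theorem filter_zeros_spec : Claim_equal_filter_zeros := by
  unfold Claim_equal_filter_zeros
  intro coeffs _dom
  unfold Spec_filter_zeros filter_zeros filter_zeros_alt
  simp only
  rw [fzGo_spec coeffs 0 none none]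
  rw [lead_spec coeffs 0 (by omega)]
  simp only [List.drop_zero]
  cases hF : firstNz coeffs with
  | none =>
    have hL : lastNz coeffs = none := (firstNz_none_iff coeffs).mp hF
    simp only [hF, hL, Option.elim]
    rw [List.drop_length]
    rw [PySem.List.slice_to coeffs (by norm_num)]
    simp
  | some k₁ =>
    obtain ⟨k₂, hL⟩ : ∃ k₂, lastNz coeffs = some k₂ := by
      cases hL : lastNz coeffs with
      | none => exact absurd hF (by rw [(firstNz_none_iff coeffs).mpr hL]; simp)
      | some m => exact ⟨m, rfl⟩
    have hk12 : k₁ ≤ k₂ := firstNz_le_lastNz coeffs k₁ k₂ hF hL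
    have hk2len : k₂ < coeffs.length := lastNz_lt_length coeffs k₂ hL
    simp only [hF, hL, Option.elim, Nat.zero_add]
    rw [trail_spec (coeffs.drop k₁) (coeffs.drop k₁).length (le_refl _)]
    rw [List.take_length, lastNz_drop coeffs k₁ k₂ hL hk12]
    simp only [Option.elim]
    conv_rhs => simp
    have hc2 : ((k₂ : Int)) + 1 = ((k₂ + 1 : Nat) : Int) := by push_cast; ring
    rw [hc2, PySem.List.slice_natCast]
    congr 1
    omega
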